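-- pv_equiv track=rewrite | github.com/russelljjarvis/teiili | models/builder/combine.py | var_replacer
-- ===== SOURCE A (Python) =====
-- def var_replacer(firstEq, secondEq, params):
--
--     """Function to delete variables from equations and parameters.
--     It works with couples of strings and a dict of parameters: firstEq, secondEq and params
--     It search for every line in secondEq for the special character '%' removing it,
--     and then search the variable (even if in differential form '%dx/dt') and erease
--     every line in fisrEq starting with that variable.(every explicit equation)
--     If the character '=' or ':' is not in the line containing the variable in secondEq
--     the entire line would be ereased.
--     Ex:
--         '%x = theta' --> 'x = theta'
--         '%x' --> ''
--     This feature allows to remove equations in the template that we don't want to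
--     compute by writing '%[variable]' in the other equation blocks.
--
--     Args:
--         firstEq (string): The first subset of equation that we want to expand or
--             overwrite .
--         secondEq (string): The second subset of equation wich will be added to firstEq
--             It also contains '%' for overwriting or ereasing lines in
--             firstEq.
--         parameters (dict): The parameter dictionary of the firstEq, var_replacer
--         will remove any variable deleted or replaced with the special character
--         '%'
--
--     Returns:
--         resultfirstEq: The first eq string containing the replaced variable eqs
--         resultsecondEq:  The second eq string without the lines containing the
--             special charachter '%'
--         params: The parameter dictionary not containing the removed/replaced variable
--     """
--
--     resultfirstEq = firstEq.splitlines()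
--     resultsecondEq = secondEq.splitlines()
--
--     for k, line in enumerate(secondEq.splitlines()):
--         if '%' in line:  # if the replace character '%' is found, extract the variable
--             var = line.split('%', 1)[1].split()[0]
--             line = line.replace("%", "")
--             if '/' in var:
--                 var = var.split('/', 1)[0][1:]
--             diffvar = 'd' + var + '/dt'
--
--             for kk, line2 in enumerate(firstEq.splitlines()):
--                 # now look for the variable in the equation lines extracted from
--                 # firstEq
--                 if (var in line2) or (diffvar in line2):
--                     # if i found a variable i need to check then if it's in explicit form
--                     # meaning it's followed by ":" or "="
--                     # e.g. "var = x+1"  or "var : 1"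
--                     if ((var == line2.replace(':', '=').split('=', 1)[0].split()[0]) or
--                     (diffvar in line2.replace(':', '=').split('=', 1)[0].split()[0])):
--                         resultfirstEq[kk] = line
--
--             #after replacing the "%" flagged line in the resultfirstEq
--             #remove that line from the resultsecondEq
--             resultsecondEq[k] = ""
--             try:
--                 params.pop(var)
--             except KeyError:
--                 pass
--
--     resultfirstEq = "\n".join(resultfirstEq)
--     resultsecondEq = "\n".join(resultsecondEq)
--
--     return resultfirstEq, resultsecondEq, params
-- ===== SOURCE B (Python) =====
-- def var_replacer(firstEq, secondEq, params):
--     """One pass over secondEq collects (var, diffvar, cleaned-line) replacement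
--     records, blanks the '%' lines and pops the params; then a single separate
--     pass over firstEq rewrites each line by its last matching record."""
--     srcLines = firstEq.splitlines()
--     outSecond = secondEq.splitlines()
--     reps = []
--     for k, line in enumerate(outSecond):
--         if '%' in line:
--             var = line.split('%', 1)[1].split()[0]
--             if '/' in var:
--                 var = var.split('/', 1)[0][1:]
--             reps.append((var, 'd' + var + '/dt', line.replace('%', '')))
--             outSecond[k] = ""
--             params.pop(var, None)
--
--     def rewrite(line2):
--         for var, diffvar, cleaned in reversed(reps):
--             if (var in line2) or (diffvar in line2):
--                 head = line2.replace(':', '=').split('=', 1)[0].split()[0]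
--                 if var == head or diffvar in head:
--                     return cleaned
--         return line2
--
--     return "\n".join(rewrite(l) for l in srcLines), "\n".join(outSecond), params
-- ===== Notes on version B (the rewrite author's own statement) =====
-- stated objective: alternative
-- what changed: Replaces A's nested loop (which re-splits and rescans all of firstEq once per '%'-line of secondEq) by one pass over secondEq collecting (var, diffvar, replacement) records and a single independent pass over firstEq rewriting each line by its last matching record.
import Mathlib
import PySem

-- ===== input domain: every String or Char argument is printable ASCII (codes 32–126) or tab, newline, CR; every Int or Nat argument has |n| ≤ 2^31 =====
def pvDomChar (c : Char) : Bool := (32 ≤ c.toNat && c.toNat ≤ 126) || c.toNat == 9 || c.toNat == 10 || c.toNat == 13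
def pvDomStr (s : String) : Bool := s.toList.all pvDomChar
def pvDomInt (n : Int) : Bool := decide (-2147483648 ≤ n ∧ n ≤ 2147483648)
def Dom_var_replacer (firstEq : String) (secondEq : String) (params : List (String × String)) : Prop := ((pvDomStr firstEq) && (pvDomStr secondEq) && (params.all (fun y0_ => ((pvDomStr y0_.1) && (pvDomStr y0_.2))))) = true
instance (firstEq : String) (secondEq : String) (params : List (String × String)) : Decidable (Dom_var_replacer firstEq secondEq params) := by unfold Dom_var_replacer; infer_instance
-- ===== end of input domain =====

-- B replaces A's nested loop (a full rescan of firstEq per '%'-line) by one collection pass over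
-- secondEq plus one independent rewrite pass over firstEq (objective: alternative decomposition).
-- A mutates `params` in place (dict.pop); the equivalence proved here is about the RETURN value only
-- (B performs the same pops).

-- ===== PORT A =====
-- shared transliterations of the token-extraction expressions both Pythons use verbatim:
-- line.split('%', 1)[1]  (only evaluated when '%' is in line, so the two pieces exist)
def pvAfterPct (line : String) : String := ((PySem.Str.splitMax? line "%" 1).getD []).getD 1 ""
-- line.split('%', 1)[1].split()[0]; the [0] is guarded by Pre_ (headD default never reached there)
def pvRawVar (line : String) : String := (PySem.Str.split₀ (pvAfterPct line)).headD ""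
-- if '/' in var: var = var.split('/', 1)[0][1:]   (s[1:] = PySem.Str.slice s 1 none, exact)
def pvFixVar (v : String) : String :=
  if PySem.Str.isIn "/" v then PySem.Str.slice (((PySem.Str.splitMax? v "/" 1).getD []).getD 0 "") (some 1) none else v
-- 'd' + var + '/dt'  (string concatenation via PySem.Str.join, exact)
def pvDiffVar (v : String) : String := PySem.Str.join "" ["d", v, "/dt"]
-- line2.replace(':', '=').split('=', 1)[0].split()
def pvLeadToks (line2 : String) : List String :=
  PySem.Str.split₀ (((PySem.Str.splitMax? (PySem.Str.replace line2 ":" "=") "=" 1).getD []).getD 0 "")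
-- (var in line2) or (diffvar in line2)
def pvMemMatch (var diffvar line2 : String) : Bool :=
  PySem.Str.isIn var line2 || PySem.Str.isIn diffvar line2
-- var == line2.replace(':','=').split('=',1)[0].split()[0] or diffvar in …[0]; the [0] is guarded by Pre_
def pvHeadMatch (var diffvar line2 : String) : Bool :=
  (var == (pvLeadToks line2).headD "") || PySem.Str.isIn diffvar ((pvLeadToks line2).headD "")

def var_replacer (firstEq : String) (secondEq : String) (params : List (String × String)) : String × String × (List (String × String)) :=
  let st :=
    (PySem.List.enumerate (PySem.Str.splitlines secondEq)).foldl
      (fun (st : List String × List String × PySem.Dict String String) kl =>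
        if PySem.Str.isIn "%" kl.2 then
          let var0 := pvRawVar kl.2
          let line := PySem.Str.replace kl.2 "%" ""
          let var := pvFixVar var0
          let diffvar := pvDiffVar var
          let rf :=
            (PySem.List.enumerate (PySem.Str.splitlines firstEq)).foldl
              (fun rf (kkl : Int × String) =>
                if pvMemMatch var diffvar kkl.2 then
                  if pvHeadMatch var diffvar kkl.2 then rf.set kkl.1.toNat line else rf
                else rf)
              st.1
          (rf, st.2.1.set kl.1.toNat "", st.2.2.erase var)   -- try: params.pop(var) except KeyError = Dict.erase
        else st)
      (PySem.Str.splitlines firstEq, PySem.Str.splitlines secondEq, PySem.Dict.ofList params)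
  (PySem.Str.join "\n" st.1, PySem.Str.join "\n" st.2.1, st.2.2.items)

-- ===== PORT B =====
-- B's reversed(reps) scan: first record (in the reversed order) whose membership and head test both
-- fire wins; on a membership hit without a head hit the scan continues, exactly as Source B's loop.
def pvRewriteRev : List (String × String × String) → String → String
  | [], line2 => line2
  | r :: t, line2 =>
      if pvMemMatch r.1 r.2.1 line2 then
        if pvHeadMatch r.1 r.2.1 line2 then r.2.2 else pvRewriteRev t line2
      else pvRewriteRev t line2

def var_replacer_alt (firstEq : String) (secondEq : String) (params : List (String × String)) : String × String × (List (String × String)) :=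
  let srcLines := PySem.Str.splitlines firstEq
  let st :=
    (PySem.List.enumerate (PySem.Str.splitlines secondEq)).foldl
      (fun (st : List String × List (String × String × String) × PySem.Dict String String) kl =>
        if PySem.Str.isIn "%" kl.2 then
          let var := pvFixVar (pvRawVar kl.2)
          (st.1.set kl.1.toNat "",
           st.2.1 ++ [(var, pvDiffVar var, PySem.Str.replace kl.2 "%" "")],
           st.2.2.erase var)   -- params.pop(var, None) = Dict.erase
        else st)
      (PySem.Str.splitlines secondEq, ([] : List (String × String × String)), PySem.Dict.ofList params)
  (PySem.Str.join "\n" (srcLines.map (fun l => pvRewriteRev st.2.1.reverse l)),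
   PySem.Str.join "\n" st.1, st.2.2.items)

-- ===== PRECONDITION & SPEC =====
-- Pre_ excludes exactly the inputs on which the Python A raises IndexError: a '%'-line of secondEq
-- with nothing but whitespace after its first '%', or a firstEq line whose part before the first
-- '='/':' has no token while some extracted var/diffvar occurs in it as a substring.
def Pre_var_replacer (firstEq : String) (secondEq : String) (params : List (String × String)) : Prop :=
  (∀ line ∈ PySem.Str.splitlines secondEq, PySem.Str.isIn "%" line = true →
      PySem.Str.split₀ (pvAfterPct line) ≠ []) ∧
  (∀ line2 ∈ PySem.Str.splitlines firstEq, ∀ line ∈ PySem.Str.splitlines secondEq,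
      PySem.Str.isIn "%" line = true →
      pvMemMatch (pvFixVar (pvRawVar line)) (pvDiffVar (pvFixVar (pvRawVar line))) line2 = true →
      pvLeadToks line2 ≠ [])
instance (firstEq : String) (secondEq : String) (params : List (String × String)) : Decidable (Pre_var_replacer firstEq secondEq params) := by unfold Pre_var_replacer; infer_instance

def pvWitness_var_replacer : String × String × (List (String × String)) :=
  ("v = 1\ndx/dt = v", "%v = 2", [("v", "1")])

def Spec_var_replacer (firstEq : String) (secondEq : String) (params : List (String × String)) (out : String × String × (List (String × String))) : Prop := out = var_replacer_alt firstEq secondEq params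
instance (firstEq : String) (secondEq : String) (params : List (String × String)) (out : String × String × (List (String × String))) : Decidable (Spec_var_replacer firstEq secondEq params out) := by unfold Spec_var_replacer; infer_instance

-- ===== CLAIM (what is proved, stated in full; the proofs are below) =====
def Claim_equal_var_replacer : Prop := ∀ (firstEq : String) (secondEq : String) (params : List (String × String)), Dom_var_replacer firstEq secondEq params → Pre_var_replacer firstEq secondEq params → Spec_var_replacer firstEq secondEq params (var_replacer firstEq secondEq params)

-- ===== LEMMAS AND PROOFS =====
-- A's combined match test on one record r = (var, diffvar, cleaned) against an original line:
def pvFull (r : String × String × String) (x : String) : Bool :=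
  pvMemMatch r.1 r.2.1 x && pvHeadMatch r.1 r.2.1 x

-- the accumulated effect of A's successive inner passes on one original line: last match wins
def pvApplyA (rs : List (String × String × String)) (x : String) : String :=
  rs.foldl (fun cur r => if pvFull r x then r.2.2 else cur) x

lemma pvApplyA_concat (rs : List (String × String × String)) (r : String × String × String) (x : String) :
    pvApplyA (rs ++ [r]) x = if pvFull r x then r.2.2 else pvApplyA rs x := by
  simp [pvApplyA, List.foldl_append]

lemma pvRewriteRev_reverse (rs : List (String × String × String)) (x : String) :
    pvRewriteRev rs.reverse x = pvApplyA rs x := by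
  induction rs using List.reverseRecOn with
  | nil => rfl
  | append_singleton ys y ih =>
      rw [List.reverse_append]
      simp only [List.reverse_singleton, List.singleton_append, pvRewriteRev, pvApplyA_concat, pvFull]
      by_cases h1 : pvMemMatch y.1 y.2.1 x <;> by_cases h2 : pvHeadMatch y.1 y.2.1 x <;>
        simp [h1, h2, ih]

lemma pvSet_append (pre rest : List String) (a c : String) :
    (pre ++ a :: rest).set pre.length c = pre ++ c :: rest := by
  induction pre with
  | nil => rfl
  | cons p t ih => simp [ih]

-- A's inner pass, run on a state of the shape pre ++ xs.map f with indices starting at pre.length,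
-- rewrites each position pointwise according to its ORIGINAL line
lemma pvInner_fold (g : String → Bool) (c : String) :
    ∀ (xs : List String) (s : Nat) (pre : List String) (f : String → String), pre.length = s →
    (PySem.List.enumerate xs (s : Int)).foldl
        (fun rf (kkl : Int × String) => if g kkl.2 then rf.set kkl.1.toNat c else rf)
        (pre ++ xs.map f)
      = pre ++ xs.map (fun x => if g x then c else f x) := by
  intro xs
  induction xs with
  | nil => intro s pre f h; simp [PySem.List.enumerate]
  | cons x t ih =>
      intro s pre f h
      simp only [PySem.List.enumerate_cons, List.foldl_cons, List.map_cons]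
      have hv : (if g x = true then (pre ++ f x :: t.map f).set ((s : Int)).toNat c
                 else pre ++ f x :: t.map f)
          = (pre ++ [if g x = true then c else f x]) ++ t.map f := by
        by_cases hg : g x
        · simp only [hg, if_true]
          rw [show ((s : Int)).toNat = pre.length by omega, pvSet_append]
          simp
        · simp [hg]
      rw [hv, show ((s : Int) + 1) = ((s + 1 : Nat) : Int) by push_cast; ring,
         ih (s + 1) (pre ++ [if g x = true then c else f x]) f (by simp [h])]
      simp

-- the two outer folds kept in lock-step: A's first component is always the pointwise image of the
-- original firstEq lines under the records B has collected so far
lemma pvOuter_fold (rf0 : List String) :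
    ∀ (l : List (Int × String)) (out2 : List String)
      (reps : List (String × String × String)) (ps : PySem.Dict String String),
    l.foldl
      (fun (st : List String × List String × PySem.Dict String String) kl =>
        if PySem.Str.isIn "%" kl.2 then
          ((PySem.List.enumerate rf0).foldl
            (fun (rf : List String) (kkl : Int × String) =>
              if pvMemMatch (pvFixVar (pvRawVar kl.2)) (pvDiffVar (pvFixVar (pvRawVar kl.2))) kkl.2 then
                if pvHeadMatch (pvFixVar (pvRawVar kl.2)) (pvDiffVar (pvFixVar (pvRawVar kl.2))) kkl.2 then
                  rf.set kkl.1.toNat (PySem.Str.replace kl.2 "%" "")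
                else rf
              else rf)
            st.1,
           st.2.1.set kl.1.toNat "", st.2.2.erase (pvFixVar (pvRawVar kl.2)))
        else st)
      (rf0.map (pvApplyA reps), out2, ps)
    = ((rf0.map (pvApplyA
        ((l.foldl
          (fun (st : List String × List (String × String × String) × PySem.Dict String String) kl =>
            if PySem.Str.isIn "%" kl.2 then
              (st.1.set kl.1.toNat "",
               st.2.1 ++ [(pvFixVar (pvRawVar kl.2), pvDiffVar (pvFixVar (pvRawVar kl.2)),
                           PySem.Str.replace kl.2 "%" "")],
               st.2.2.erase (pvFixVar (pvRawVar kl.2)))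
            else st)
          (out2, reps, ps)).2.1))),
       (l.foldl
          (fun (st : List String × List (String × String × String) × PySem.Dict String String) kl =>
            if PySem.Str.isIn "%" kl.2 then
              (st.1.set kl.1.toNat "",
               st.2.1 ++ [(pvFixVar (pvRawVar kl.2), pvDiffVar (pvFixVar (pvRawVar kl.2)),
                           PySem.Str.replace kl.2 "%" "")],
               st.2.2.erase (pvFixVar (pvRawVar kl.2)))
            else st)
          (out2, reps, ps)).1,
       (l.foldl
          (fun (st : List String × List (String × String × String) × PySem.Dict String String) kl =>
            if PySem.Str.isIn "%" kl.2 then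
              (st.1.set kl.1.toNat "",
               st.2.1 ++ [(pvFixVar (pvRawVar kl.2), pvDiffVar (pvFixVar (pvRawVar kl.2)),
                           PySem.Str.replace kl.2 "%" "")],
               st.2.2.erase (pvFixVar (pvRawVar kl.2)))
            else st)
          (out2, reps, ps)).2.2) := by
  intro l
  induction l with
  | nil => intro out2 reps ps; rfl
  | cons kl t ih =>
      intro out2 reps ps
      simp only [List.foldl_cons]
      by_cases h : PySem.Str.isIn "%" kl.2
      · rw [if_pos h, if_pos h]
        set var := pvFixVar (pvRawVar kl.2) with hvar
        set line := PySem.Str.replace kl.2 "%" "" with hline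
        have hinner :
            (PySem.List.enumerate rf0).foldl
              (fun (rf : List String) (kkl : Int × String) =>
                if pvMemMatch var (pvDiffVar var) kkl.2 then
                  if pvHeadMatch var (pvDiffVar var) kkl.2 then rf.set kkl.1.toNat line else rf
                else rf)
              (rf0.map (pvApplyA reps))
            = rf0.map (pvApplyA (reps ++ [(var, pvDiffVar var, line)])) := by
          have hfun :
              (fun (rf : List String) (kkl : Int × String) =>
                if pvMemMatch var (pvDiffVar var) kkl.2 then
                  if pvHeadMatch var (pvDiffVar var) kkl.2 then rf.set kkl.1.toNat line else rf
                else rf)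
              = (fun (rf : List String) (kkl : Int × String) =>
                  if pvFull (var, pvDiffVar var, line) kkl.2 then rf.set kkl.1.toNat line else rf) := by
            funext rf kkl
            by_cases h1 : pvMemMatch var (pvDiffVar var) kkl.2 <;>
              by_cases h2 : pvHeadMatch var (pvDiffVar var) kkl.2 <;>
                simp [pvFull, h1, h2]
          rw [hfun]
          have hif := pvInner_fold (pvFull (var, pvDiffVar var, line)) line rf0 0 []
            (pvApplyA reps) rfl
          simp only [Nat.cast_zero, List.nil_append] at hif
          rw [hif]
          apply List.map_congr_left
          intro x _
          simp [pvApplyA_concat]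
        rw [hinner]
        exact ih (out2.set kl.1.toNat "") (reps ++ [(var, pvDiffVar var, line)]) (ps.erase var)
      · rw [if_neg h, if_neg h]
        exact ih out2 reps ps

-- ===== VERDICT (by name: the statement is the Claim_ definition above) =====
theorem var_replacer_spec : Claim_equal_var_replacer := by
  intro firstEq secondEq params _ _
  unfold Spec_var_replacer
  simp only [var_replacer, var_replacer_alt]
  have key := pvOuter_fold (PySem.Str.splitlines firstEq)
      (PySem.List.enumerate (PySem.Str.splitlines secondEq))
      (PySem.Str.splitlines secondEq) [] (PySem.Dict.ofList params)
  rw [show pvApplyA [] = fun x => x from rfl] at key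
  simp only [List.map_id_fun', id] at key
  rw [key]
  simp only [pvRewriteRev_reverse]
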